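-- pv_equiv track=rewrite | github.com/Enzo-Laborde/AutoSeqTools | AStools.py | complexityCompute
-- ===== SOURCE A (Python) =====
-- def complexityCompute(seq, blocSizeMax, step):
-- 	"""
-- 	Function that compute the complexity in sequence 'seq', up to size word 'BlocSizeMax'. 'step' say to compute complexity for diferent prefix length (every 'step' length).
-- 	"""
--
-- 	Complexity = []  # List of list of i-th complexity
--
-- 	# Iteration for all size word (blocs) between 1 and max size specified
-- 	for i in range(1, blocSizeMax + 1):
-- 		j = 0
-- 		cmplx = []
--
-- 		length = step  # Iterate on diferent sequence length to see evolution
-- 		subWord = []  # For a same bloc size, store all of them of size i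
-- 		# subWord is reset only when we change bloc size, and not durigng length iteration
--
-- 		# Iteration for diferent sequence length
-- 		while length <= len(seq):
--
-- 			while j + i <= length:
-- 				c = seq[j:j + i]  # Bloc considered
--
-- 				if c not in subWord:
-- 					subWord.append(c)
--
-- 				j += 1
--
-- 			length += step
-- 			cmplx.append(len(subWord))
--
-- 		Complexity.append(cmplx)
--
-- 	return Complexity
-- ===== SOURCE B (Python) =====
-- def complexityCompute(seq, blocSizeMax, step):
--     n = len(seq)
--     return [
--         [len({seq[k:k + i] for k in range(L - i + 1)})
--          for L in range(step, n + 1, step)]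
--         for i in range(1, blocSizeMax + 1)
--     ]
-- ===== Notes on version B (the rewrite author's own statement) =====
-- stated objective: simpler
-- what changed: B drops A's cross-checkpoint cursor j and persistent subWord list: for each bloc size i it recomputes, at every checkpoint length L, the distinct substring count from scratch as the size of a set comprehension over all start positions, as two nested list comprehensions.
import Mathlib
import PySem

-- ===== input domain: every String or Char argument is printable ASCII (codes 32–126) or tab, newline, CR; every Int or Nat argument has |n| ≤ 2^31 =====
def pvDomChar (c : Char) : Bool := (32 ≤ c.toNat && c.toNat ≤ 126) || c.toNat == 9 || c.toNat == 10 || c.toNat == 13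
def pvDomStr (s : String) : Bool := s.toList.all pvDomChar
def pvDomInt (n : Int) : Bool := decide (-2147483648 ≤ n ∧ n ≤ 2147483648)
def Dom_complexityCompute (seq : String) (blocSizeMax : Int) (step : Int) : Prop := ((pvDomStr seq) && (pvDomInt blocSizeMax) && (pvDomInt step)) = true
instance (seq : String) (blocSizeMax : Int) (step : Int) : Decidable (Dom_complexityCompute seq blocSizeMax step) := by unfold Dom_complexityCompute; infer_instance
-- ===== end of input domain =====

-- B replaces A's incremental pass (cursor j and persistent subWord carried across checkpoints)
-- by recomputing, at each checkpoint length L, the distinct-substring count from scratch as the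
-- size of a set built over all start positions; objective: simpler (two nested comprehensions).

-- ===== PORT A =====
-- inner 'while j + i <= length' loop of A
def ccInner (seq : String) (i L : Int) (j : Int) (sw : List String) : Int × List String :=
  if j + i ≤ L then
    let c := PySem.Str.slice seq (some j) (some (j + i))
    ccInner seq i L (j + 1) (if sw.contains c then sw else sw ++ [c])
  else (j, sw)
termination_by (L - i - j + 1).toNat
decreasing_by omega

-- outer 'while length <= len(seq)' loop of A (fuel makes the recursion total; under
-- Pre_ the fuel passed below is never exhausted)
def ccOuter (seq : String) (i step : Int) (fuel : Nat) (L j : Int) (sw : List String) (cmplx : List Int) : List Int :=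
  match fuel with
  | 0 => cmplx
  | fuel + 1 =>
    if L ≤ PySem.Str.len seq then
      let r := ccInner seq i L j sw
      ccOuter seq i step fuel (L + step) r.1 r.2 (cmplx ++ [(r.2.length : Int)])
    else cmplx

def complexityCompute (seq : String) (blocSizeMax : Int) (step : Int) : List (List Int) :=
  (PySem.List.pyRange 1 (blocSizeMax + 1) 1).foldl
    (fun acc i => acc ++ [ccOuter seq i step (seq.toList.length + 1) step 0 [] []]) []

-- ===== PORT B =====
-- len({seq[k:k+i] for k in range(L-i+1)})
def ccCount (seq : String) (i L : Int) : Int :=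
  PySem.Set.len (PySem.Set.ofList
    ((PySem.List.pyRange 0 (L - i + 1) 1).map
      (fun k => PySem.Str.slice seq (some k) (some (k + i)))))

def complexityCompute_alt (seq : String) (blocSizeMax : Int) (step : Int) : List (List Int) :=
  (PySem.List.pyRange 1 (blocSizeMax + 1) 1).map (fun i =>
    (PySem.List.pyRange step (PySem.Str.len seq + 1) step).map (fun L => ccCount seq i L))

-- ===== PRECONDITION & SPEC =====
-- Pre_ excludes step ≤ 0 together with blocSizeMax ≥ 1: there A's 'while length <= len(seq)'
-- never terminates (Python diverges, returns nothing).
def Pre_complexityCompute (seq : String) (blocSizeMax : Int) (step : Int) : Prop :=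
  1 ≤ step ∨ blocSizeMax < 1
instance (seq : String) (blocSizeMax : Int) (step : Int) : Decidable (Pre_complexityCompute seq blocSizeMax step) := by unfold Pre_complexityCompute; infer_instance

def pvWitness_complexityCompute : String × Int × Int := ("abab", 2, 1)

def Spec_complexityCompute (seq : String) (blocSizeMax : Int) (step : Int) (out : List (List Int)) : Prop := out = complexityCompute_alt seq blocSizeMax step
instance (seq : String) (blocSizeMax : Int) (step : Int) (out : List (List Int)) : Decidable (Spec_complexityCompute seq blocSizeMax step out) := by unfold Spec_complexityCompute; infer_instance

-- ===== CLAIM (what is proved, stated in full; the proofs are below) =====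
def Claim_equal_complexityCompute : Prop := ∀ (seq : String) (blocSizeMax : Int) (step : Int), Dom_complexityCompute seq blocSizeMax step → Pre_complexityCompute seq blocSizeMax step → Spec_complexityCompute seq blocSizeMax step (complexityCompute seq blocSizeMax step)

-- ===== LEMMAS AND PROOFS =====

-- pyRange cons/nil for a general positive step
lemma pyRange_pos_eq_nil (a b s : Int) (hs : 0 < s) (h : b ≤ a) :
    PySem.List.pyRange a b s = [] := by
  rw [PySem.List.pyRange_of_pos a b hs]
  simp [show ¬ a < b by omega]

lemma pyRange_pos_cons (a b s : Int) (hs : 0 < s) (h : a < b) :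
    PySem.List.pyRange a b s = a :: PySem.List.pyRange (a + s) b s := by
  rw [PySem.List.pyRange_of_pos a b hs, PySem.List.pyRange_of_pos (a + s) b hs]
  have hdiv : (b - a + s - 1) / s = (b - a - 1) / s + 1 := by
    have : b - a + s - 1 = (b - a - 1) + 1 * s := by ring
    rw [this, Int.add_mul_ediv_right _ _ (by omega : s ≠ 0)]
  by_cases h2 : a + s < b
  · have hnn : 0 ≤ (b - a - 1) / s := Int.ediv_nonneg (by omega) (by omega)
    have hc : ((b - a + s - 1) / s).toNat = ((b - (a + s) + s - 1) / s).toNat + 1 := by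
      have : b - (a + s) + s - 1 = b - a - 1 := by ring
      rw [this, hdiv]; omega
    simp only [if_pos h, if_pos h2, hc, List.range_succ_eq_map, List.map_cons, List.map_map]
    refine congrArg₂ List.cons (by push_cast; ring) ?_
    apply List.map_congr_left; intro k _
    simp only [Function.comp, Nat.succ_eq_add_one]; push_cast; ring
  · have hz : (b - a - 1) / s = 0 := Int.ediv_eq_zero_of_lt (by omega) (by omega)
    have hc : ((b - a + s - 1) / s).toNat = 1 := by rw [hdiv, hz]; rfl
    simp only [if_pos h, if_neg h2, hc]
    simp [List.range_succ]

-- A's membership-guarded append is Python's set add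
lemma add_step_eq (sw : List String) (c : String) :
    (if sw.contains c then sw else sw ++ [c]) = PySem.Set.add sw c := by
  simp [PySem.Set.add, PySem.Set.contains]

-- the set A has accumulated after scanning start positions 0 .. j-1
def ccAcc (seq : String) (i j : Int) : List String :=
  (PySem.List.pyRange 0 j 1).foldl
    (fun s k => PySem.Set.add s (PySem.Str.slice seq (some k) (some (k + i)))) []

lemma ccInner_eq (seq : String) (i L : Int) : ∀ (j : Int) (sw : List String),
    ccInner seq i L j sw =
      (max j (L - i + 1),
       (PySem.List.pyRange j (L - i + 1) 1).foldl
         (fun s k => PySem.Set.add s (PySem.Str.slice seq (some k) (some (k + i)))) sw) := by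
  intro j sw
  induction j, sw using ccInner.induct seq i L with
  | case1 j sw h c ih =>
    rw [ccInner, if_pos h]
    simp only [dite_eq_ite] at ih
    show ccInner seq i L (j + 1) (if sw.contains c then sw else sw ++ [c]) = _
    rw [ih, PySem.List.pyRange_one_cons (by omega : j < L - i + 1)]
    simp only [List.foldl_cons, add_step_eq]
    congr 1
    omega
  | case2 j sw h =>
    rw [ccInner, if_neg h]
    rw [PySem.List.pyRange_one_eq_nil (by omega : L - i + 1 ≤ j)]
    simp only [List.foldl_nil]
    congr 1
    omega

-- B's per-checkpoint count is the length of the accumulated set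
lemma ccCount_eq_acc (seq : String) (i L : Int) :
    ccCount seq i L = ((ccAcc seq i (max 0 (L - i + 1))).length : Int) := by
  unfold ccCount ccAcc
  have hr : PySem.List.pyRange 0 (L - i + 1) 1 = PySem.List.pyRange 0 (max 0 (L - i + 1)) 1 := by
    by_cases h : 0 ≤ L - i + 1
    · congr 1; omega
    · rw [PySem.List.pyRange_one_eq_nil (by omega), PySem.List.pyRange_one_eq_nil (by omega)]
  rw [PySem.Set.ofList_eq_foldl, List.foldl_map, hr]
  rfl

lemma ccAcc_append (seq : String) (i : Int) (j j' : Int) (h0 : 0 ≤ j) (h : j ≤ j') :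
    ccAcc seq i j' =
      (PySem.List.pyRange j j' 1).foldl
        (fun s k => PySem.Set.add s (PySem.Str.slice seq (some k) (some (k + i))))
        (ccAcc seq i j) := by
  unfold ccAcc
  rw [PySem.List.pyRange_one_append 0 j j' h0 h, List.foldl_append]

lemma ccOuter_eq (seq : String) (i step : Int) (hs : 1 ≤ step) :
    ∀ (fuel : Nat) (L j : Int) (cmplx : List Int),
    0 ≤ j → j = max 0 (L - step - i + 1) →
    (PySem.Str.len seq + 1 - L).toNat ≤ fuel →
    ccOuter seq i step fuel L j (ccAcc seq i j) cmplx =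
      cmplx ++ (PySem.List.pyRange L (PySem.Str.len seq + 1) step).map (fun L' => ccCount seq i L') := by
  intro fuel
  induction fuel with
  | zero =>
    intro L j cmplx _ _ hf
    rw [pyRange_pos_eq_nil _ _ _ (by omega) (by omega)]
    simp [ccOuter]
  | succ f ih =>
    intro L j cmplx hj0 hj hf
    by_cases hL : L ≤ PySem.Str.len seq
    · rw [ccOuter, if_pos hL]
      have hmax : max j (L - i + 1) = max 0 (L - i + 1) := by omega
      have hsub : PySem.List.pyRange j (L - i + 1) 1 = PySem.List.pyRange j (max j (L - i + 1)) 1 := by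
        by_cases hc : j < L - i + 1
        · congr 1; omega
        · rw [PySem.List.pyRange_one_eq_nil (by omega), PySem.List.pyRange_one_eq_nil (by omega)]
      have hinner : ccInner seq i L j (ccAcc seq i j) =
          (max 0 (L - i + 1), ccAcc seq i (max 0 (L - i + 1))) := by
        rw [ccInner_eq, hsub, ← ccAcc_append seq i j (max j (L - i + 1)) hj0 (by omega), hmax]
      rw [hinner]
      rw [ih (L + step) (max 0 (L - i + 1)) _ (by omega) (by omega) (by omega)]
      rw [pyRange_pos_cons L _ step (by omega) (by omega), List.map_cons]
      rw [ccCount_eq_acc]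
      simp
    · rw [ccOuter, if_neg hL]
      rw [pyRange_pos_eq_nil _ _ _ (by omega) (by omega)]
      simp

lemma foldl_append_map {α β : Type} (g : α → β) (l : List α) :
    ∀ acc : List β, l.foldl (fun a x => a ++ [g x]) acc = acc ++ l.map g := by
  induction l with
  | nil => intro acc; simp
  | cons x xs ih => intro acc; simp [List.foldl_cons, ih]

-- ===== VERDICT (by name: the statement is the Claim_ definition above) =====
theorem complexityCompute_spec : Claim_equal_complexityCompute := by
  intro seq bmax step _hdom hpre
  unfold Spec_complexityCompute complexityCompute complexityCompute_alt
  rw [foldl_append_map]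
  simp only [List.nil_append]
  rcases hpre with hs | hb
  · apply List.map_congr_left
    intro i hi
    have hi1 : 1 ≤ i := (PySem.List.mem_pyRange_one.mp hi).1
    have hlen : PySem.Str.len seq = (seq.toList.length : Int) := by
      simp [PySem.Str.len]
    have h0 : ccAcc seq i 0 = [] := by
      unfold ccAcc
      rw [PySem.List.pyRange_one_eq_nil (by omega)]
      rfl
    rw [← h0]
    exact ccOuter_eq seq i step hs (seq.toList.length + 1) step 0 [] (by omega) (by omega)
      (by rw [hlen]; omega)
  · rw [PySem.List.pyRange_one_eq_nil (by omega : bmax + 1 ≤ 1)]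
    rfl
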